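-- pv_equiv track=rewrite | github.com/BruceWong02/SimplifyPolyLog-Transformer | utilities/CheckNumRange.py | check
-- ===== SOURCE A (Python) =====
-- def check(pns):
--     max_value = 0
--     idx = None
--
--     for i, pn in enumerate(pns):
--         tokens = pn.split()
--         for token in tokens:
--             if token.isdigit() and int(token) > max_value:
--                 # return token, i
--                 max_value = int(token)
--                 idx = i
--
--     # return None, None
--     return max_value, idx
-- ===== SOURCE B (Python) =====
-- def check(pns):
--     # Two-pass: first compute the overall maximum digit token, then locate
--     # the first line that contains it.
--     overall_max = max((int(t) for pn in pns for t in pn.split() if t.isdigit()),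
--                       default=0)
--     if overall_max == 0:
--         return 0, None
--     for i, pn in enumerate(pns):
--         if any(t.isdigit() and int(t) == overall_max for t in pn.split()):
--             return overall_max, i
--     return overall_max, None  # unreachable: overall_max came from some token
-- ===== Notes on version B (the rewrite author's own statement) =====
-- stated objective: alternative
-- what changed: Replaces the single running-max scan with running (max,idx) state by a compute-the-overall-max pass followed by a first-occurrence search for the line containing it.
import Mathlib
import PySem

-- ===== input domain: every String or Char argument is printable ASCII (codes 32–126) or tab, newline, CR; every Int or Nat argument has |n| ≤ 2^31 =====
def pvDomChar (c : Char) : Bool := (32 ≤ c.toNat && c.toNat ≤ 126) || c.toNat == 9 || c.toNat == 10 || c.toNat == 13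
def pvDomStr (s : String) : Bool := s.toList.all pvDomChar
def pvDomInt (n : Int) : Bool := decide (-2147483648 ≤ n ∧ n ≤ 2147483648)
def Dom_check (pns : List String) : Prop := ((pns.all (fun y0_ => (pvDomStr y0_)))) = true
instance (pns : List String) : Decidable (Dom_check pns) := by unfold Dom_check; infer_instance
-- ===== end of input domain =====

-- B replaces A's one-pass running-max scan by a compute-overall-max pass plus a
-- first-occurrence search for the line containing it (alternative decomposition, same cost).

-- ===== PORT A =====
def check (pns : List String) : Int × Option Int :=
  (PySem.List.enumerate pns).foldl
    (fun st ipn =>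
      (PySem.Str.split₀ ipn.2).foldl
        (fun st token =>
          if PySem.Str.strIsdigit token && decide ((PySem.Int.ofStr? token).getD 0 > st.1) then
            ((PySem.Int.ofStr? token).getD 0, some ipn.1)
          else st) st)
    (0, none)

-- ===== PORT B =====
def check_alt (pns : List String) : Int × Option Int :=
  let vals := pns.flatMap (fun pn =>
    ((PySem.Str.split₀ pn).filter PySem.Str.strIsdigit).map (fun t => (PySem.Int.ofStr? t).getD 0))
  let m := vals.foldl max 0
  if m = 0 then (0, none)
  else
    match (PySem.List.enumerate pns).find? (fun p =>
        (PySem.Str.split₀ p.2).any (fun t =>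
          PySem.Str.strIsdigit t && decide ((PySem.Int.ofStr? t).getD 0 = m))) with
    | some p => (m, some p.1)
    | none => (m, none)

-- ===== PRECONDITION & SPEC =====
def Spec_check (pns : List String) (out : Int × Option Int) : Prop := out = check_alt pns
instance (pns : List String) (out : Int × Option Int) : Decidable (Spec_check pns out) := by unfold Spec_check; infer_instance

-- ===== CLAIM (what is proved, stated in full; the proofs are below) =====
def Claim_equal_check : Prop := ∀ (pns : List String), Dom_check pns → Spec_check pns (check pns)

-- ===== LEMMAS AND PROOFS =====

/-- the integer value A and B both read from a token -/
def tokVal (t : String) : Int := (PySem.Int.ofStr? t).getD 0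

/-- per-line list of digit-token values, as B builds it -/
def lineVals (pn : String) : List Int :=
  ((PySem.Str.split₀ pn).filter PySem.Str.strIsdigit).map tokVal

theorem le_foldl_max (l : List Int) (m : Int) : m ≤ l.foldl max m := by
  induction l generalizing m with
  | nil => simp
  | cons a t ih => exact le_trans (le_max_left m a) (ih (max m a))

theorem mem_le_foldl_max (l : List Int) (m v : Int) (hv : v ∈ l) : v ≤ l.foldl max m := by
  induction l generalizing m with
  | nil => cases hv
  | cons a t ih =>
    rcases List.mem_cons.mp hv with h | h
    · subst h; exact le_trans (le_max_right m v) (le_foldl_max t _)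
    · exact ih _ h

theorem mem_of_foldl_max_gt (l : List Int) (m : Int) (h : l.foldl max m > m) :
    l.foldl max m ∈ l := by
  induction l generalizing m with
  | nil => simp at h
  | cons a t ih =>
    simp only [List.foldl_cons] at h ⊢
    by_cases hc : t.foldl max (max m a) > max m a
    · exact List.mem_cons_of_mem _ (ih _ hc)
    · have h1 : t.foldl max (max m a) = max m a := le_antisymm (by omega) (le_foldl_max _ _)
      have h2 : max m a = a := by rcases max_choice m a with hx | hx <;> omega
      rw [h1, h2]
      exact List.mem_cons_self

/-- inner token loop of A -/
theorem inner_loop (i : Int) (ts : List String) (m : Int) (idx : Option Int) :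
    ts.foldl
      (fun st token =>
        if PySem.Str.strIsdigit token && decide ((PySem.Int.ofStr? token).getD 0 > st.1) then
          ((PySem.Int.ofStr? token).getD 0, some i)
        else st) (m, idx)
    = ((((ts.filter PySem.Str.strIsdigit).map tokVal).foldl max m),
       if (((ts.filter PySem.Str.strIsdigit).map tokVal).foldl max m) > m then some i else idx) := by
  induction ts generalizing m idx with
  | nil => simp
  | cons t rest ih =>
    by_cases hd : PySem.Str.strIsdigit t
    · simp only [List.foldl_cons, List.filter_cons, hd, List.map_cons, if_pos]
      by_cases hv : (PySem.Int.ofStr? t).getD 0 > m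
      · have hmax : max m ((PySem.Int.ofStr? t).getD 0) = (PySem.Int.ofStr? t).getD 0 := by omega
        simp only [hv, decide_true, Bool.and_self, if_pos, ih, tokVal, hmax]
        have hle := le_foldl_max ((rest.filter PySem.Str.strIsdigit).map tokVal) ((PySem.Int.ofStr? t).getD 0)
        have hgt : ((rest.filter PySem.Str.strIsdigit).map tokVal).foldl max ((PySem.Int.ofStr? t).getD 0) > m := by omega
        simp only [hgt, if_pos]
        split_ifs <;> rfl
      · have hmax : max m ((PySem.Int.ofStr? t).getD 0) = m := by omega
        simp only [hv, decide_false, Bool.and_false, if_neg, Bool.false_eq_true,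
          not_false_iff, ih, tokVal, hmax]
    · simp only [List.foldl_cons, List.filter_cons, hd, Bool.false_and, Bool.false_eq_true,
        not_false_iff, if_neg, ih]

/-- the line predicate B searches with, rephrased as membership in lineVals -/
theorem any_eq_contains (pn : String) (M : Int) :
    (PySem.Str.split₀ pn).any (fun t =>
      PySem.Str.strIsdigit t && decide ((PySem.Int.ofStr? t).getD 0 = M))
    = (lineVals pn).contains M := by
  simp only [lineVals, List.contains_eq_any_beq, List.any_eq,
    decide_eq_decide]
  constructor
  · rintro ⟨t, ht, h⟩
    simp only [Bool.and_eq_true, decide_eq_true_eq] at h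
    refine ⟨tokVal t, List.mem_map_of_mem (List.mem_filter.mpr ⟨ht, h.1⟩), ?_⟩
    simp [tokVal, h.2]
  · rintro ⟨v, hv, hbeq⟩
    rcases List.mem_map.mp hv with ⟨t, htf, rfl⟩
    rcases List.mem_filter.mp htf with ⟨ht, hdg⟩
    refine ⟨t, ht, ?_⟩
    have hMt : M = tokVal t := by simpa using hbeq
    simp only [Bool.and_eq_true, decide_eq_true_eq]
    exact ⟨hdg, hMt.symm⟩

/-- outer line loop of A, characterised by B's overall max + first-occurrence search -/
theorem outer_loop (lines : List String) (s m : Int) (idx : Option Int) :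
    (PySem.List.enumerate lines s).foldl
      (fun st ipn =>
        (PySem.Str.split₀ ipn.2).foldl
          (fun st token =>
            if PySem.Str.strIsdigit token && decide ((PySem.Int.ofStr? token).getD 0 > st.1) then
              ((PySem.Int.ofStr? token).getD 0, some ipn.1)
            else st) st) (m, idx)
    = (((lines.flatMap lineVals).foldl max m),
       if ((lines.flatMap lineVals).foldl max m) > m then
         (match (PySem.List.enumerate lines s).find? (fun p =>
             (lineVals p.2).contains ((lines.flatMap lineVals).foldl max m)) with
          | some p => some p.1
          | none => idx)
       else idx) := by
  induction lines generalizing s m idx with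
  | nil => simp [PySem.List.enumerate]
  | cons pn rest ih =>
    rw [PySem.List.enumerate_cons]
    simp only [List.foldl_cons]
    rw [inner_loop s (PySem.Str.split₀ pn) m idx]
    set m1 := ((( PySem.Str.split₀ pn).filter PySem.Str.strIsdigit).map tokVal).foldl max m with hm1
    have hline : lineVals pn = ((PySem.Str.split₀ pn).filter PySem.Str.strIsdigit).map tokVal := rfl
    rw [ih]
    have hM : (rest.flatMap lineVals).foldl max m1 =
        ((pn :: rest).flatMap lineVals).foldl max m := by
      simp [List.flatMap_cons, List.foldl_append, hline, hm1]
    set M := ((pn :: rest).flatMap lineVals).foldl max m with hMdef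
    rw [hM]
    have hm1le : m ≤ m1 := by rw [hm1]; exact le_foldl_max _ _
    have hMge : m1 ≤ M := by rw [← hM]; exact le_foldl_max _ _
    by_cases h1 : M > m1
    · -- the max is reached in a later line; pn cannot contain M
      have hpn : (lineVals pn).contains M = false := by
        rw [Bool.eq_false_iff]
        intro hc
        have hmemc : M ∈ lineVals pn := List.contains_iff_mem.mp hc
        have := mem_le_foldl_max (((PySem.Str.split₀ pn).filter PySem.Str.strIsdigit).map tokVal) m M (by rwa [← hline])
        rw [← hm1] at this; omega
      have hMm : M > m := by omega
      have hpn' : M ∉ lineVals pn := by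
        intro hm
        have hc := List.contains_iff_mem.mpr hm
        rw [hpn] at hc
        exact Bool.false_ne_true hc
      have hfind : (PySem.List.enumerate rest (s+1)).find? (fun p => (lineVals p.2).contains M) ≠ none := by
        have hmem : M ∈ rest.flatMap lineVals := by
          have h' := mem_of_foldl_max_gt (rest.flatMap lineVals) m1 (by rw [hM]; exact h1)
          rwa [hM] at h'
        rcases List.mem_flatMap.mp hmem with ⟨ln, hln, hMln⟩
        rcases (List.mem_iff_getElem.mp hln) with ⟨k, hk, hgk⟩
        intro hnone
        have := List.find?_eq_none.mp hnone ((s+1) + k, ln) (by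
          apply (PySem.List.mem_enumerate_iff _ _ _).mpr
          exact ⟨k, hk, by simp [hgk]⟩)
        simp only [List.contains_iff_mem] at this
        exact this (by simpa using hMln)
      have hstep := List.find?_cons_of_neg (p := fun p : Int × String => (lineVals p.2).contains M)
        (a := (s, pn)) (l := PySem.List.enumerate rest (s+1)) (by simpa using hpn')
      rw [if_pos h1, if_pos hMm, hstep]
      cases hf : (PySem.List.enumerate rest (s+1)).find? (fun p => (lineVals p.2).contains M) with
      | none => exact absurd hf hfind
      | some p => rfl
    · -- the running max already equals M after pn
      have hMeq : M = m1 := by omega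
      rw [if_neg h1]
      by_cases hMm : M > m
      · have hm1m : m1 > m := by omega
        have hpn : (lineVals pn).contains M = true := by
          apply List.contains_iff_mem.mpr
          have h' := mem_of_foldl_max_gt (((PySem.Str.split₀ pn).filter PySem.Str.strIsdigit).map tokVal) m (by rw [← hm1]; exact hm1m)
          rw [← hm1, ← hMeq] at h'
          rwa [hline]
        have hstep := List.find?_cons_of_pos (p := fun p : Int × String => (lineVals p.2).contains M)
          (a := (s, pn)) (l := PySem.List.enumerate rest (s+1)) (by simpa using hpn)
        rw [if_pos hMm, hstep, if_pos hm1m]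
      · have hm1m : ¬ m1 > m := by omega
        rw [if_neg hMm, if_neg hm1m]
-- ===== VERDICT (by name: the statement is the Claim_ definition above) =====
theorem check_spec : Claim_equal_check := by
  intro pns _
  show check pns = check_alt pns
  unfold check check_alt
  rw [outer_loop pns 0 0 none]
  have hflat : (pns.flatMap (fun pn =>
      ((PySem.Str.split₀ pn).filter PySem.Str.strIsdigit).map (fun t => (PySem.Int.ofStr? t).getD 0)))
      = pns.flatMap lineVals := rfl
  simp only [hflat]
  set M := (pns.flatMap lineVals).foldl max 0 with hMdef
  have hpred : (fun p : Int × String => (PySem.Str.split₀ p.2).any (fun t =>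
        PySem.Str.strIsdigit t && decide ((PySem.Int.ofStr? t).getD 0 = M)))
      = (fun p : Int × String => (lineVals p.2).contains M) := by
    funext p; exact any_eq_contains p.2 M
  rw [hpred]
  have hM0 : (0:Int) ≤ M := le_foldl_max _ _
  by_cases h : M = 0
  · rw [if_pos h, if_neg (by omega)]
    exact congrArg (fun x => (x, (none : Option Int))) h
  · rw [if_neg h, if_pos (by omega)]
    cases hf : (PySem.List.enumerate pns 0).find? (fun p => (lineVals p.2).contains M) <;> rfl
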